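-- pv_equiv track=rewrite | github.com/coder-brunette/geeks4geeks_google_sde_questions | sum_of_bit_diff.py | sum_of_bit_diff
-- ===== SOURCE A (Python) =====
-- def sum_of_bit_diff(arr):
--     n = len(arr)
--     sum = 0
--
--     for i in range(n):
--         for j in range(i+1, n):
--             xor_res = arr[i] ^ arr[j]
--             bit_diff = bin(xor_res).count('1')
--             sum += bit_diff
--     return sum * 2
-- ===== SOURCE B (Python) =====
-- def sum_of_bit_diff(arr):
--     # group equal values: pairs of equal values differ in 0 bits, so only
--     # distinct value pairs contribute, weighted by their multiplicities
--     freq = {}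
--     for x in arr:
--         freq[x] = freq.get(x, 0) + 1
--     items = list(freq.items())
--     total = 0
--     while items:
--         u, cu = items.pop(0)
--         for v, cv in items:
--             total += cu * cv * bin(u ^ v).count('1')
--     return 2 * total
-- ===== Notes on version B (the rewrite author's own statement) =====
-- stated objective: alternative
-- what changed: Replaced A's O(n^2) double loop over index pairs by a one-pass dict counter grouping equal values, then summing multiplicity-weighted popcounts over pairs of DISTINCT values only (equal-value pairs contribute 0 bits), which collapses duplicate work.
import Mathlib
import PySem

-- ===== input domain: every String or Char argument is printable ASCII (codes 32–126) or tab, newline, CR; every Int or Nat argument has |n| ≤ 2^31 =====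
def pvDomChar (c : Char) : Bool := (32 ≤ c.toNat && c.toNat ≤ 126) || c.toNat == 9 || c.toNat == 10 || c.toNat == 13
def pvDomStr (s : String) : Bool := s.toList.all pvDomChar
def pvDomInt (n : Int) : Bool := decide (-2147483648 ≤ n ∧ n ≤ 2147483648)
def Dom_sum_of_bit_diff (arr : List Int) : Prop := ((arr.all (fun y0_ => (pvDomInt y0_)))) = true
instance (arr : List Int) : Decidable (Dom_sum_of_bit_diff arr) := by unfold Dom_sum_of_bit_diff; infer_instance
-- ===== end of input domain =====

-- B groups equal values with a one-pass dict counter and sums multiplicity-weighted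
-- popcounts over pairs of DISTINCT values only (equal values differ in 0 bits),
-- collapsing duplicate work; a different traversal, not measured faster in general.

-- ===== PORT A =====
-- bin(v).count('1') counts the binary digits '1' of |v|, i.e. PySem.Int.bitCount v (Python-exact).
def sum_of_bit_diff (arr : List Int) : Int :=
  let n : Int := (arr.length : Int)
  let s : Int := (PySem.List.pyRange 0 n 1).foldl (fun s i =>
      (PySem.List.pyRange (i + 1) n 1).foldl (fun s j =>
        s + (PySem.Int.bitCount
              (PySem.Int.bxor (PySem.List.pyGetD arr i 0) (PySem.List.pyGetD arr j 0)) : Int)) s) 0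
  s * 2

-- ===== PORT B =====
-- the 'while items: u, cu = items.pop(0); for v, cv in items: …' loop of Source B
def pvLoopB : Int → List (Int × Int) → Int
  | total, [] => total
  | total, (u, cu) :: items =>
      pvLoopB (items.foldl (fun t p =>
        t + cu * p.2 * (PySem.Int.bitCount (PySem.Int.bxor u p.1) : Int)) total) items

def sum_of_bit_diff_alt (arr : List Int) : Int :=
  let freq : PySem.Dict Int Int :=
    arr.foldl (fun d x => d.insert x (d.getD x 0 + 1)) PySem.Dict.empty
  2 * pvLoopB 0 freq.items

-- ===== PRECONDITION & SPEC =====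
def Spec_sum_of_bit_diff (arr : List Int) (out : Int) : Prop := out = sum_of_bit_diff_alt arr
instance (arr : List Int) (out : Int) : Decidable (Spec_sum_of_bit_diff arr out) := by unfold Spec_sum_of_bit_diff; infer_instance

-- ===== CLAIM (what is proved, stated in full; the proofs are below) =====
def Claim_equal_sum_of_bit_diff : Prop := ∀ (arr : List Int), Dom_sum_of_bit_diff arr → Spec_sum_of_bit_diff arr (sum_of_bit_diff arr)

-- ===== LEMMAS AND PROOFS =====

-- the per-pair contribution: popcount of the xor
def pvF (u v : Int) : Int := (PySem.Int.bitCount (PySem.Int.bxor u v) : Int)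

def pvRow (x : Int) (r : List Int) : Int := (r.map (pvF x)).sum

-- A's sum over index pairs i < j
def pvPairs : List Int → Int
  | [] => 0
  | x :: r => pvRow x r + pvPairs r

-- full (ordered, diagonal included) double sum over the list
def pvG (l : List Int) (x : Int) : Int := (l.map (pvF x)).sum
def pvFull (l : List Int) : Int := (l.map (pvG l)).sum

-- B's sum over pairs of items, and its full weighted double sum
def pvWPairs : List (Int × Int) → Int
  | [] => 0
  | (u, cu) :: rest => (rest.map (fun q => cu * q.2 * pvF u q.1)).sum + pvWPairs rest

def pvWG (il : List (Int × Int)) (u : Int) : Int := (il.map (fun q => q.2 * pvF u q.1)).sum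
def pvWFull (il : List (Int × Int)) : Int := (il.map (fun p => p.2 * pvWG il p.1)).sum

theorem pvMulSum (c : Int) (g : Int × Int → Int) (l : List (Int × Int)) :
    c * (l.map g).sum = (l.map (fun q => c * g q)).sum := by
  induction l with
  | nil => simp
  | cons q r ih => simp only [List.map_cons, List.sum_cons, ← ih]; ring

theorem pvF_self (x : Int) : pvF x x = 0 := by
  simp [pvF, PySem.Int.bxor_self]

theorem pvF_comm (x y : Int) : pvF x y = pvF y x := by
  simp [pvF, PySem.Int.bxor_comm]

-- A = 2 * pvPairs  ↦  pvFull
theorem pvFull_eq (l : List Int) : pvFull l = 2 * pvPairs l := by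
  induction l with
  | nil => rfl
  | cons x r ih =>
      have hx : pvG (x :: r) x = pvG r x := by
        simp [pvG, pvF_self]
      have hr : (r.map (pvG (x :: r))).sum = pvRow x r + pvFull r := by
        have h1 : r.map (pvG (x :: r)) = r.map (fun y => pvF x y + pvG r y) := by
          apply List.map_congr_left
          intro y _
          simp [pvG, pvF_comm y x]
        rw [h1, PySem.List.sum_map_add_int]
        rfl
      have : pvFull (x :: r) = pvG (x :: r) x + (r.map (pvG (x :: r))).sum := by
        simp [pvFull]
      rw [this, hx, hr, ih, pvPairs]
      have hgx : pvG r x = pvRow x r := rfl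
      rw [hgx]; ring

-- B = 2 * pvWPairs  ↦  pvWFull
theorem pvWFull_eq (il : List (Int × Int)) : pvWFull il = 2 * pvWPairs il := by
  induction il with
  | nil => rfl
  | cons p rest ih =>
      obtain ⟨u, cu⟩ := p
      have hx : pvWG ((u, cu) :: rest) u = cu * pvF u u + pvWG rest u := by
        simp [pvWG]
      have hr : (rest.map (fun q => q.2 * pvWG ((u, cu) :: rest) q.1)).sum
          = (rest.map (fun q => cu * q.2 * pvF u q.1)).sum + pvWFull rest := by
        have h1 : rest.map (fun q => q.2 * pvWG ((u, cu) :: rest) q.1)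
            = rest.map (fun q => cu * q.2 * pvF u q.1 + q.2 * pvWG rest q.1) := by
          apply List.map_congr_left
          intro q _
          simp [pvWG, pvF_comm q.1 u]
          ring
        rw [h1, PySem.List.sum_map_add_int]
        rfl
      have : pvWFull ((u, cu) :: rest)
          = cu * pvWG ((u, cu) :: rest) u
            + (rest.map (fun q => q.2 * pvWG ((u, cu) :: rest) q.1)).sum := by
        simp [pvWFull]
      have hc : cu * pvWG rest u = (rest.map (fun q => cu * q.2 * pvF u q.1)).sum := by
        unfold pvWG
        rw [pvMulSum cu (fun q => q.2 * pvF u q.1) rest]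
        apply congrArg
        apply List.map_congr_left
        intro q _
        ring
      rw [this, hx, hr, ih, pvWPairs, pvF_self, mul_add, hc]
      ring

-- split a map-sum at one value v: count v copies of h v plus the rest
theorem pvSplitAt (h : Int → Int) (v : Int) (l : List Int) :
    (l.map h).sum = (l.count v : Int) * h v + ((l.filter (fun y => y ≠ v)).map h).sum := by
  induction l with
  | nil => simp
  | cons x r ih =>
      by_cases hx : x = v
      · subst hx
        rw [List.count_cons_self]
        simp only [List.map_cons, List.sum_cons, ih]
        rw [List.filter_cons_of_neg (by simp)]
        push_cast
        ring
      · rw [List.count_cons_of_ne hx]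
        simp only [List.map_cons, List.sum_cons, ih]
        rw [List.filter_cons_of_pos (by simpa using hx), List.map_cons, List.sum_cons]
        ring

-- a nodup list D with the same members as l expands counts back into the plain sum
theorem pvExpand (h : Int → Int) : ∀ (D l : List Int), D.Nodup →
    (∀ v, v ∈ D ↔ v ∈ l) →
    (D.map (fun v => (l.count v : Int) * h v)).sum = (l.map h).sum := by
  intro D
  induction D with
  | nil =>
      intro l _ hm
      have : l = [] := by
        cases l with
        | nil => rfl
        | cons x r => exact absurd ((hm x).mpr List.mem_cons_self) (by simp)
      rw [this]; rfl
  | cons v D' ih =>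
      intro l hnd hm
      have hnd' : D'.Nodup := hnd.of_cons
      have hvD' : v ∉ D' := by
        have := hnd; rw [List.nodup_cons] at this; exact this.1
      have hm' : ∀ u, u ∈ D' ↔ u ∈ l.filter (fun y => y ≠ v) := by
        intro u
        constructor
        · intro hu
          have huv : u ≠ v := fun he => hvD' (he ▸ hu)
          have hul : u ∈ l := (hm u).mp (List.mem_cons_of_mem v hu)
          exact List.mem_filter.mpr ⟨hul, by simpa using huv⟩
        · intro hu
          have := List.mem_filter.mp hu
          have huv : u ≠ v := by simpa using this.2
          have := (hm u).mpr this.1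
          rcases List.mem_cons.mp this with he | hD
          · exact absurd he huv
          · exact hD
      have hcnt : ∀ u ∈ D', (l.filter (fun y => y ≠ v)).count u = l.count u := by
        intro u hu
        have huv : u ≠ v := fun he => hvD' (he ▸ hu)
        exact List.count_filter (by simpa using huv)
      rw [List.map_cons, List.sum_cons]
      have hmap : D'.map (fun u => (l.count u : Int) * h u)
          = D'.map (fun u => ((l.filter (fun y => y ≠ v)).count u : Int) * h u) := by
        apply List.map_congr_left
        intro u hu
        rw [hcnt u hu]
      rw [hmap, ih (l.filter (fun y => y ≠ v)) hnd' hm', pvSplitAt h v l]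

-- pvLoopB is pvWPairs plus the running total
theorem pvLoopB_eq : ∀ (il : List (Int × Int)) (total : Int),
    pvLoopB total il = total + pvWPairs il := by
  intro il
  induction il with
  | nil => intro total; simp [pvLoopB, pvWPairs]
  | cons p rest ih =>
      intro total
      obtain ⟨u, cu⟩ := p
      rw [pvLoopB, ih, PySem.List.foldl_add (β := Int × Int) rest
            (fun p => cu * p.2 * (PySem.Int.bitCount (PySem.Int.bxor u p.1) : Int)) total,
          pvWPairs]
      have : rest.map (fun p => cu * p.2 * (PySem.Int.bitCount (PySem.Int.bxor u p.1) : Int))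
          = rest.map (fun q => cu * q.2 * pvF u q.1) := rfl
      rw [this]
      ring

-- the weighted full sum over the counter's items equals the plain full sum over arr
theorem pvWFull_items (arr : List Int) :
    pvWFull ((PySem.Set.ofList arr).map (fun k => (k, (arr.count k : Int)))) = pvFull arr := by
  set D := PySem.Set.ofList arr with hD
  have hnd : D.Nodup := PySem.Set.nodup_ofList arr
  have hm : ∀ v, v ∈ D ↔ v ∈ arr := fun v => PySem.Set.mem_ofList arr v
  have hinner : ∀ u : Int,
      pvWG (D.map (fun k => (k, (arr.count k : Int)))) u = pvG arr u := by
    intro u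
    unfold pvWG
    rw [List.map_map]
    have : ((fun q : Int × Int => q.2 * pvF u q.1) ∘ fun k => (k, (arr.count k : Int)))
        = fun v => (arr.count v : Int) * pvF u v := rfl
    rw [this, pvExpand (pvF u) D arr hnd hm]
    rfl
  unfold pvWFull
  rw [List.map_map]
  have : ((fun p : Int × Int => p.2 * pvWG (D.map (fun k => (k, (arr.count k : Int)))) p.1)
      ∘ fun k => (k, (arr.count k : Int)))
      = fun v => (arr.count v : Int) * pvG arr v := by
    funext v
    simp only [Function.comp]
    rw [hinner v]
  rw [this, pvExpand (pvG arr) D arr hnd hm]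
  rfl

-- A's double range loop computes pvPairs of the suffix
theorem A_outer (arr : List Int) : ∀ (d : Nat) (a : Int), 0 ≤ a →
    (((arr.length : Int)) - a).toNat = d → ∀ s : Int,
    (PySem.List.pyRange a (arr.length : Int) 1).foldl (fun s i =>
        (PySem.List.pyRange (i + 1) (arr.length : Int) 1).foldl (fun s j =>
          s + (PySem.Int.bitCount
                (PySem.Int.bxor (PySem.List.pyGetD arr i 0) (PySem.List.pyGetD arr j 0)) : Int)) s) s
      = s + pvPairs (arr.drop a.toNat) := by
  intro d
  induction d with
  | zero =>
      intro a ha hd s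
      have hge : (arr.length : Int) ≤ a := by omega
      rw [PySem.List.pyRange_one_eq_nil hge]
      have : arr.drop a.toNat = [] := List.drop_eq_nil_of_le (by omega)
      rw [this]
      simp [pvPairs]
  | succ d ih =>
      intro a ha hd s
      have hlt : a < (arr.length : Int) := by omega
      rw [PySem.List.pyRange_one_cons hlt]
      rw [List.foldl_cons]
      have hinner : ∀ t : Int,
          (PySem.List.pyRange (a + 1) (arr.length : Int) 1).foldl (fun s j =>
            s + (PySem.Int.bitCount
                  (PySem.Int.bxor (PySem.List.pyGetD arr a 0) (PySem.List.pyGetD arr j 0)) : Int)) t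
          = t + pvRow (PySem.List.pyGetD arr a 0) (arr.drop (a + 1).toNat) := by
        intro t
        rw [PySem.List.foldl_pyRange_pyGetD' arr 0
              (fun acc y => acc + (PySem.Int.bitCount
                (PySem.Int.bxor (PySem.List.pyGetD arr a 0) y) : Int)) t (by omega)]
        rw [PySem.List.foldl_add]
        rfl
      rw [hinner s]
      rw [ih (a + 1) (by omega) (by omega) _]
      have hna : a.toNat < arr.length := by omega
      have hdrop : arr.drop a.toNat = arr[a.toNat] :: arr.drop (a.toNat + 1) :=
        List.drop_eq_getElem_cons hna
      have hget : PySem.List.pyGetD arr a 0 = arr[a.toNat] :=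
        PySem.List.pyGetD_eq_getElem arr 0 ha (by omega)
      have hsucc : (a + 1).toNat = a.toNat + 1 := by omega
      rw [hsucc, hdrop, pvPairs, hget]
      ring

-- ===== VERDICT (by name: the statement is the Claim_ definition above) =====
theorem sum_of_bit_diff_spec : Claim_equal_sum_of_bit_diff := by
  intro arr _
  unfold Spec_sum_of_bit_diff
  have hA : sum_of_bit_diff arr = pvPairs arr * 2 := by
    simp only [sum_of_bit_diff]
    rw [A_outer arr arr.length 0 le_rfl (by simp) 0]
    simp
  have hB : sum_of_bit_diff_alt arr
      = 2 * pvWPairs ((PySem.Set.ofList arr).map (fun k => (k, (arr.count k : Int)))) := by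
    simp only [sum_of_bit_diff_alt]
    rw [PySem.Dict.foldl_insert_getD_add_one_eq_counter, PySem.Dict.items_counter,
        pvLoopB_eq, zero_add]
  rw [hA, hB, ← pvWFull_eq, pvWFull_items, pvFull_eq]
  ring
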